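-- pv_equiv track=rewrite | github.com/ahmeds6016/Tadabbur | backend/tests/test_text_cleaning.py | sanitize_explanation_text
-- ===== SOURCE A (Python) =====
-- def sanitize_explanation_text(text):
--     """Mirror of the function in app.py for testing the full pipeline."""
--     if not text:
--         return text
--     lines = text.split('\n')
--     cleaned_lines = []
--     for line in lines:
--         stripped = line.lstrip()
--         leading_spaces = len(line) - len(stripped)
--         if leading_spaces > 4:
--             line = '    ' + stripped if stripped else ''
--         cleaned_lines.append(line)
--     return '\n'.join(cleaned_lines)
-- ===== SOURCE B (Python) =====
-- def sanitize_explanation_text(text):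
--     if not text:
--         return text
--     out = []
--     i, n = 0, len(text)
--     while i < n:
--         j = i
--         while j < n and text[j].isspace() and text[j] != '\n':
--             j += 1
--         k = j
--         while k < n and text[k] != '\n':
--             k += 1
--         if j - i > 4:
--             if j < k:
--                 out.append('    ')
--                 out.append(text[j:k])
--         else:
--             out.append(text[i:k])
--         if k < n:
--             out.append('\n')
--             i = k + 1
--         else:
--             i = k
--     return ''.join(out)
-- ===== Notes on version B (the rewrite author's own statement) =====
-- stated objective: alternative
-- what changed: Replaces A's split-into-lines/per-line lstrip/join pipeline with a single left-to-right scan that walks the text once with explicit indices, measuring each line's leading-whitespace run and its body in place and emitting output pieces directly.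
import Mathlib
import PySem

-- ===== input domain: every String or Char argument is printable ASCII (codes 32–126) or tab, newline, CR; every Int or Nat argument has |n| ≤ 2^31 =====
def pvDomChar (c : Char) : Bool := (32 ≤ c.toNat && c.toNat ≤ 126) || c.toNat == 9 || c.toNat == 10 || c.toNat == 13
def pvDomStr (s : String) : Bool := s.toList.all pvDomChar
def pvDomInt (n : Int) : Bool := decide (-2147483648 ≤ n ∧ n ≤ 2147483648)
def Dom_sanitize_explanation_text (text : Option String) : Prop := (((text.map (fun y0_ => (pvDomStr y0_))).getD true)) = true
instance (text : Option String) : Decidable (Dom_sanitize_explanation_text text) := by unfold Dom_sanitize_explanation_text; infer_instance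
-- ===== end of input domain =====

-- B replaces A's split-into-lines / per-line-lstrip / join pipeline by a single left-to-right
-- scan over the characters with explicit line-start pointers (alternative decomposition).

-- ===== PORT A =====
-- per-line body of A's for-loop
def pvCleanLineA (line : List Char) : List Char :=
  let stripped := PySem.Chars.lstrip line
  let leading : Int := (line.length : Int) - (stripped.length : Int)
  if 4 < leading then (if stripped ≠ [] then ' ' :: ' ' :: ' ' :: ' ' :: stripped else [])
  else line

def sanitize_explanation_text (text : Option String) : Option String :=
  match text with
  | none => none
  | some s =>
    if s.toList = [] then some s
    else
      some (String.ofList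
        (PySem.Chars.join ['\n'] ((PySem.Chars.splitOn s.toList ['\n']).map pvCleanLineA)))

-- ===== PORT B =====
-- Source B's inner while-loops advance an index over a whitespace run and then over the rest of the
-- line; PySem has no index-scan primitive, so they are ported exactly as takeWhile/dropWhile
-- spans over the same characters with the same character tests.
def pvBws (c : Char) : Bool := PySem.Chars.isspace c && c != '\n'

-- output contributed by the line starting at the current position (Source B's append block)
def pvLineB (l : List Char) : List Char :=
  let ws := l.takeWhile pvBws
  let body := (l.dropWhile pvBws).takeWhile (fun d => d != '\n')
  if 4 < ws.length then (if body ≠ [] then ' ' :: ' ' :: ' ' :: ' ' :: body else [])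
  else ws ++ body

def pvScanB : List Char → List Char
  | [] => []
  | c :: cs =>
    match h : ((c :: cs).dropWhile pvBws).dropWhile (fun d => d != '\n') with
    | [] => pvLineB (c :: cs)
    | _ :: t => pvLineB (c :: cs) ++ '\n' :: pvScanB t
termination_by cs => cs.length
decreasing_by
  have h1 : (((c :: cs).dropWhile pvBws).dropWhile (fun d => d != '\n')).length ≤
      ((c :: cs).dropWhile pvBws).length := List.length_dropWhile_le _ _
  have h2 : ((c :: cs).dropWhile pvBws).length ≤ (c :: cs).length :=
    List.length_dropWhile_le _ _
  rw [h] at h1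
  simp at h1 h2 ⊢
  omega

def sanitize_explanation_text_alt (text : Option String) : Option String :=
  match text with
  | none => none
  | some s =>
    if s.toList = [] then some s
    else some (String.ofList (pvScanB s.toList))

-- ===== PRECONDITION & SPEC =====
def Spec_sanitize_explanation_text (text : Option String) (out : Option String) : Prop := out = sanitize_explanation_text_alt text
instance (text : Option String) (out : Option String) : Decidable (Spec_sanitize_explanation_text text out) := by unfold Spec_sanitize_explanation_text; infer_instance

-- ===== CLAIM (what is proved, stated in full; the proofs are below) =====
def Claim_equal_sanitize_explanation_text : Prop := ∀ (text : Option String), Dom_sanitize_explanation_text text → Spec_sanitize_explanation_text text (sanitize_explanation_text text)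

-- ===== LEMMAS AND PROOFS =====

-- proof-only reference splitter: split on '\n', structurally
def pvSplitNL : List Char → List (List Char)
  | [] => [[]]
  | c :: cs => if c = '\n' then [] :: pvSplitNL cs else (pvSplitNL cs).modifyHead (c :: ·)

lemma pvSplitNL_ne_nil (l : List Char) : pvSplitNL l ≠ [] := by
  induction l with
  | nil => simp [pvSplitNL]
  | cons c cs ih =>
    by_cases h : c = '\n'
    · simp [pvSplitNL, h]
    · simp only [pvSplitNL, if_neg h]
      cases hcs : pvSplitNL cs with
      | nil => exact absurd hcs ih
      | cons a r => simp [List.modifyHead]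

lemma pvBws_nl : pvBws '\n' = false := by decide

lemma pvGo_eq (fuel : Nat) : ∀ (l cur : List Char) (acc : List (List Char)),
    l.length ≤ fuel →
    PySem.Chars.splitOn.go ['\n'] fuel l cur acc =
      acc.reverse ++ (pvSplitNL l).modifyHead (cur.reverse ++ ·) := by
  induction fuel with
  | zero =>
    intro l cur acc hl
    have : l = [] := by cases l <;> simp_all
    subst this
    simp [PySem.Chars.splitOn.go, pvSplitNL]
  | succ fuel ih =>
    intro l cur acc hl
    cases l with
    | nil => simp [PySem.Chars.splitOn.go, pvSplitNL]
    | cons c rest =>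
      by_cases hc : c = '\n'
      · subst hc
        have hp : List.isPrefixOf ['\n'] ('\n' :: rest) = true := by
          simp [List.isPrefixOf]
        simp only [PySem.Chars.splitOn.go, hp, if_pos, List.length_cons, List.drop_succ_cons,
          List.drop_zero, List.length_singleton, List.length_nil]
        rw [ih rest [] (cur.reverse :: acc) (by simpa using Nat.le_of_succ_le_succ hl)]
        cases hcs : pvSplitNL rest <;> simp [pvSplitNL, List.modifyHead, hcs]
      · have hp : List.isPrefixOf ['\n'] (c :: rest) = false := by
          simp [List.isPrefixOf, bne]
          exact fun hh => absurd hh.symm hc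
        simp only [PySem.Chars.splitOn.go, hp]
        rw [if_neg (by simp [hp])]
        rw [ih rest (c :: cur) acc (by simpa using Nat.le_of_succ_le_succ hl)]
        simp only [pvSplitNL, if_neg hc, List.modifyHead_modifyHead]
        congr 1
        cases hcs : pvSplitNL rest with
        | nil => exact absurd hcs (pvSplitNL_ne_nil rest)
        | cons a r => simp [List.modifyHead]

lemma pvSplitOn_eq (cs : List Char) : PySem.Chars.splitOn cs ['\n'] = pvSplitNL cs := by
  unfold PySem.Chars.splitOn
  rw [pvGo_eq (cs.length + 1) cs [] [] (by omega)]
  cases hcs : pvSplitNL cs with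
  | nil => exact absurd hcs (pvSplitNL_ne_nil cs)
  | cons a r => simp [List.modifyHead]

lemma pvDrop_drop (l : List Char) :
    (l.dropWhile pvBws).dropWhile (fun d => d != '\n') = l.dropWhile (fun d => d != '\n') := by
  induction l with
  | nil => rfl
  | cons c cs ih =>
    by_cases hn : c = '\n'
    · subst hn
      simp [List.dropWhile_cons, pvBws_nl]
    · by_cases hb : pvBws c = true
      · simp [List.dropWhile_cons, hb, hn, ih]
      · simp [List.dropWhile_cons, hb, hn]

lemma pvTake_bws (l : List Char) :
    l.takeWhile pvBws = (l.takeWhile (fun d => d != '\n')).takeWhile PySem.Chars.isspace := by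
  induction l with
  | nil => rfl
  | cons c cs ih =>
    by_cases hn : c = '\n'
    · subst hn
      simp [List.takeWhile_cons, pvBws_nl]
    · by_cases hs : PySem.Chars.isspace c = true
      · simp [List.takeWhile_cons, pvBws, hn, hs, ih]
      · simp [List.takeWhile_cons, pvBws, hn, hs]

lemma pvBody_eq (l : List Char) :
    (l.dropWhile pvBws).takeWhile (fun d => d != '\n') =
      (l.takeWhile (fun d => d != '\n')).dropWhile PySem.Chars.isspace := by
  induction l with
  | nil => rfl
  | cons c cs ih =>
    by_cases hn : c = '\n'
    · subst hn
      simp [List.dropWhile_cons, List.takeWhile_cons, pvBws_nl]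
    · by_cases hs : PySem.Chars.isspace c = true
      · simp [List.dropWhile_cons, List.takeWhile_cons, pvBws, hn, hs, ih]
      · simp [List.dropWhile_cons, List.takeWhile_cons, pvBws, hn, hs]

lemma pvLineB_eq (l : List Char) :
    pvLineB l = pvCleanLineA (l.takeWhile (fun d => d != '\n')) := by
  unfold pvLineB pvCleanLineA
  rw [pvTake_bws, pvBody_eq]
  simp only [PySem.Chars.lstrip]
  have hsplit :
      (l.takeWhile (fun d => d != '\n')).takeWhile PySem.Chars.isspace ++
        (l.takeWhile (fun d => d != '\n')).dropWhile PySem.Chars.isspace =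
      l.takeWhile (fun d => d != '\n') := List.takeWhile_append_dropWhile
  have hlen : ((l.takeWhile (fun d => d != '\n')).takeWhile PySem.Chars.isspace).length +
      ((l.takeWhile (fun d => d != '\n')).dropWhile PySem.Chars.isspace).length =
      (l.takeWhile (fun d => d != '\n')).length := by
    rw [← List.length_append, hsplit]
  by_cases h4 : 4 < ((l.takeWhile (fun d => d != '\n')).takeWhile PySem.Chars.isspace).length
  · rw [if_pos h4, if_pos (show (4 : Int) < ((l.takeWhile (fun d => d != '\n')).length : Int) -
      (((l.takeWhile (fun d => d != '\n')).dropWhile PySem.Chars.isspace).length : Int) by omega)]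
  · rw [if_neg h4, if_neg (show ¬((4 : Int) < ((l.takeWhile (fun d => d != '\n')).length : Int) -
      (((l.takeWhile (fun d => d != '\n')).dropWhile PySem.Chars.isspace).length : Int)) by omega)]
    exact hsplit

lemma pvSplit_of_drop_nil (l : List Char) (h : l.dropWhile (fun d => d != '\n') = []) :
    pvSplitNL l = [l] := by
  induction l with
  | nil => rfl
  | cons c cs ih =>
    by_cases hn : c = '\n'
    · subst hn; simp at h
    · rw [List.dropWhile_cons, if_pos (by simp [hn])] at h
      simp [pvSplitNL, hn, ih h, List.modifyHead]

lemma pvSplit_of_drop_cons (l : List Char) (x : Char) (t : List Char)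
    (h : l.dropWhile (fun d => d != '\n') = x :: t) :
    pvSplitNL l = (l.takeWhile (fun d => d != '\n')) :: pvSplitNL t := by
  induction l with
  | nil => simp [List.dropWhile] at h
  | cons c cs ih =>
    by_cases hn : c = '\n'
    · subst hn
      rw [List.dropWhile_cons, if_neg (by simp)] at h
      cases h
      simp [pvSplitNL]
    · rw [List.dropWhile_cons, if_pos (by simp [hn])] at h
      rw [List.takeWhile_cons, if_pos (by simp [hn])]
      simp only [pvSplitNL, if_neg hn, ih h, List.modifyHead]

lemma pvScanB_eq (cs : List Char) :
    pvScanB cs = PySem.Chars.join ['\n'] ((pvSplitNL cs).map pvCleanLineA) := by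
  induction cs using pvScanB.induct with
  | case1 =>
    rw [pvScanB.eq_def]
    simp [pvSplitNL, pvCleanLineA, PySem.Chars.lstrip, PySem.Chars.join_singleton]
  | case2 c cs h =>
    rw [pvDrop_drop] at h
    have hself : (c :: cs).takeWhile (fun d => d != '\n') = c :: cs := by
      conv_rhs => rw [← List.takeWhile_append_dropWhile (p := fun d => d != '\n')
        (l := c :: cs), h]
      simp
    rw [pvSplit_of_drop_nil _ h]
    rw [pvScanB.eq_def]
    split
    next heq => simp at heq
    next c' cs' heq =>
      injection heq with h1 h2
      subst h1; subst h2
      split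
      next heq2 =>
        rw [pvLineB_eq, hself]
        simp [PySem.Chars.join_singleton]
      next x t heq2 =>
        rw [pvDrop_drop, h] at heq2
        simp at heq2
  | case3 c cs x t h ih =>
    rw [pvDrop_drop] at h
    rw [pvSplit_of_drop_cons _ _ _ h]
    rw [pvScanB.eq_def]
    split
    next heq => simp at heq
    next c' cs' heq =>
      injection heq with h1 h2
      subst h1; subst h2
      split
      next heq2 =>
        rw [pvDrop_drop, h] at heq2
        simp at heq2
      next x' t' heq2 =>
        rw [pvDrop_drop, h] at heq2
        injection heq2 with h3 h4
        subst h4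
        rw [pvLineB_eq]
        cases hcs : pvSplitNL t with
        | nil => exact absurd hcs (pvSplitNL_ne_nil t)
        | cons a r =>
          rw [hcs] at ih
          simp only [List.map_cons, PySem.Chars.join_cons_cons, ih]
          simp

-- ===== VERDICT (by name: the statement is the Claim_ definition above) =====
theorem sanitize_explanation_text_spec : Claim_equal_sanitize_explanation_text := by
  intro text _
  unfold Spec_sanitize_explanation_text
  match text with
  | none => rfl
  | some s =>
    simp only [sanitize_explanation_text, sanitize_explanation_text_alt]
    by_cases h : s.toList = []
    · simp [h]
    · simp [h, pvScanB_eq, pvSplitOn_eq]
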